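-- pv_equiv track=rewrite | github.com/collinsakenga/codewars_solutions | 5 kyu/Dont Drink the Water.py | separate_liquids
-- ===== SOURCE A (Python) =====
-- def separate_liquids(glass):
--     if not glass: return []
--     count=[0]*4
--     for i in glass:
--         count[0]+=i.count("O")
--         count[1]+=i.count("A")
--         count[2]+=i.count("W")
--         count[3]+=i.count("H")
--     res=[[""]*len(glass[i]) for i in range(len(glass))]
--     for i in range(len(res)):
--         for j in range(len(res[i])):
--             if count[0]:
--                 res[i][j]="O"
--                 count[0]-=1
--             elif count[1]:
--                 res[i][j]="A"
--                 count[1]-=1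
--             elif count[2]:
--                 res[i][j]="W"
--                 count[2]-=1
--             elif count[3]:
--                 res[i][j]="H"
--                 count[3]-=1
--     return res
-- ===== SOURCE B (Python) =====
-- def separate_liquids(glass):
--     flat = list("O" * sum(row.count("O") for row in glass)
--                 + "A" * sum(row.count("A") for row in glass)
--                 + "W" * sum(row.count("W") for row in glass)
--                 + "H" * sum(row.count("H") for row in glass))
--     res = []
--     for row in glass:
--         chunk, flat = flat[:len(row)], flat[len(row):]
--         res.append(chunk + [""] * (len(row) - len(chunk)))
--     return res
-- ===== Notes on version B (the rewrite author's own statement) =====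
-- stated objective: simpler
-- what changed: B builds one flat sorted list of liquid cells ('O'*c0+'A'*c1+'W'*c2+'H'*c3) and reshapes it across the rows with slicing and ''-padding, replacing A's per-cell if/elif cascade over four decrementing counters mutating a prefilled grid.
import Mathlib
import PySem

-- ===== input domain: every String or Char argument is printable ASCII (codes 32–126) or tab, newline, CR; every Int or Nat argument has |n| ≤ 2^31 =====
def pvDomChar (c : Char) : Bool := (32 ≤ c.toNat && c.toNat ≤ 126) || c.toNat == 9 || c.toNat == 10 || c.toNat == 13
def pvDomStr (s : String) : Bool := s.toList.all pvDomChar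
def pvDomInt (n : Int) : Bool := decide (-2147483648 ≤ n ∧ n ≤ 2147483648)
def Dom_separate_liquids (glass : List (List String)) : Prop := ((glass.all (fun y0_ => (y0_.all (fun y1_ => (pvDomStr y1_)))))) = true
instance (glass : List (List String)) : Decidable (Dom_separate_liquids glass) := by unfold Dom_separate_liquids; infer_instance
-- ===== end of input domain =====

-- B reshapes one flat sorted list over the rows instead of A's per-cell decrementing-counter if/elif cascade (objective: simpler).

-- ===== PORT A =====
-- the four-counter accumulation loop: count[k] += i.count(ch)
def countA (glass : List (List String)) : Int × Int × Int × Int :=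
  glass.foldl (fun c i =>
    (c.1 + (PySem.List.count i "O" : Int),
     c.2.1 + (PySem.List.count i "A" : Int),
     c.2.2.1 + (PySem.List.count i "W" : Int),
     c.2.2.2 + (PySem.List.count i "H" : Int))) (0, 0, 0, 0)

-- inner loop over row cells: each cell of the prefilled ""-row is overwritten via the if/elif cascade
def fillRowA : Nat → Int × Int × Int × Int → List String × (Int × Int × Int × Int)
  | 0, s => ([], s)
  | n + 1, (a, b, c, d) =>
    let (v, s') :=
      if a ≠ 0 then ("O", (a - 1, b, c, d))
      else if b ≠ 0 then ("A", (a, b - 1, c, d))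
      else if c ≠ 0 then ("W", (a, b, c - 1, d))
      else if d ≠ 0 then ("H", (a, b, c, d - 1))
      else ("", (a, b, c, d))
    let (rest, s'') := fillRowA n s'
    (v :: rest, s'')

-- outer loop over rows, threading the counters
def fillRowsA : List (List String) → Int × Int × Int × Int → List (List String)
  | [], _ => []
  | row :: rs, s =>
    let (r, s') := fillRowA row.length s
    r :: fillRowsA rs s'

def separate_liquids (glass : List (List String)) : List (List String) :=
  if glass = [] then [] else fillRowsA glass (countA glass)

-- ===== PORT B =====
def countB (glass : List (List String)) (ch : String) : Nat :=
  (glass.map (fun row => PySem.List.count row ch)).sum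

-- flat = list("O"*cO + "A"*cA + "W"*cW + "H"*cH)
def flatB (glass : List (List String)) : List String :=
  List.replicate (countB glass "O") "O" ++ List.replicate (countB glass "A") "A" ++
  List.replicate (countB glass "W") "W" ++ List.replicate (countB glass "H") "H"

-- chunk, flat = flat[:len(row)], flat[len(row):]; res.append(chunk + [""]*(len(row)-len(chunk)))
def reshapeB : List (List String) → List String → List (List String)
  | [], _ => []
  | row :: rs, flat =>
    let chunk := flat.take row.length
    (chunk ++ List.replicate (row.length - chunk.length) "") :: reshapeB rs (flat.drop row.length)

def separate_liquids_alt (glass : List (List String)) : List (List String) :=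
  reshapeB glass (flatB glass)

-- ===== PRECONDITION & SPEC =====
def Spec_separate_liquids (glass : List (List String)) (out : List (List String)) : Prop := out = separate_liquids_alt glass
instance (glass : List (List String)) (out : List (List String)) : Decidable (Spec_separate_liquids glass out) := by unfold Spec_separate_liquids; infer_instance

-- ===== CLAIM =====
def Claim_equal_separate_liquids : Prop := ∀ (glass : List (List String)), Dom_separate_liquids glass → Spec_separate_liquids glass (separate_liquids glass)

-- ===== LEMMAS AND PROOFS =====

-- the flat sorted stream generated by a counter state
def flatOf (a b c d : Nat) : List String :=
  List.replicate a "O" ++ List.replicate b "A" ++ List.replicate c "W" ++ List.replicate d "H"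

-- the counter state after filling n cells
def consume : Nat → Nat × Nat × Nat × Nat → Nat × Nat × Nat × Nat
  | 0, s => s
  | n + 1, (a, b, c, d) =>
    if a ≠ 0 then consume n (a - 1, b, c, d)
    else if b ≠ 0 then consume n (a, b - 1, c, d)
    else if c ≠ 0 then consume n (a, b, c - 1, d)
    else if d ≠ 0 then consume n (a, b, c, d - 1)
    else (a, b, c, d)

lemma countA_aux (gs : List (List String)) (x y z w : Int) :
    gs.foldl (fun c i =>
      (c.1 + (PySem.List.count i "O" : Int),
       c.2.1 + (PySem.List.count i "A" : Int),
       c.2.2.1 + (PySem.List.count i "W" : Int),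
       c.2.2.2 + (PySem.List.count i "H" : Int))) (x, y, z, w) =
      (x + (countB gs "O" : Int), y + (countB gs "A" : Int),
       z + (countB gs "W" : Int), w + (countB gs "H" : Int)) := by
  induction gs generalizing x y z w with
  | nil => simp [countB]
  | cons g gs ih =>
    simp only [List.foldl_cons, ih, countB, List.map_cons, List.sum_cons]
    push_cast
    refine Prod.ext ?_ (Prod.ext ?_ (Prod.ext ?_ ?_)) <;> simp <;> ring

lemma countA_eq (glass : List (List String)) :
    countA glass = ((countB glass "O" : Int), (countB glass "A" : Int),
                    (countB glass "W" : Int), (countB glass "H" : Int)) := by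
  simpa using countA_aux glass 0 0 0 0

lemma fillRowA_eq (n : Nat) (a b c d : Nat) :
    fillRowA n ((a : Int), (b : Int), (c : Int), (d : Int)) =
      ((flatOf a b c d).take n ++
         List.replicate (n - ((flatOf a b c d).take n).length) "",
       (((consume n (a, b, c, d)).1 : Int), ((consume n (a, b, c, d)).2.1 : Int),
        ((consume n (a, b, c, d)).2.2.1 : Int), ((consume n (a, b, c, d)).2.2.2 : Int))) := by
  have hx : ∀ (k : Nat), ((k : Int) + 1) ≠ 0 := by intro k; omega
  have hz : ∀ (m : Nat), consume m (0, 0, 0, 0) = (0, 0, 0, 0) := by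
    intro m; induction m with
    | zero => rfl
    | succ m _ => simp [consume]
  induction n generalizing a b c d with
  | zero => simp [fillRowA, consume]
  | succ n ih =>
    rcases a with _ | a
    · rcases b with _ | b
      · rcases c with _ | c
        · rcases d with _ | d
          · have h := ih 0 0 0 0
            simp [flatOf, hz] at h
            simp [fillRowA, consume, flatOf, List.replicate_succ, h]
          · have h := ih 0 0 0 d
            simp [flatOf] at h
            simp [fillRowA, consume, flatOf, List.replicate_succ, hx, h, Nat.succ_sub_succ]
        · have h := ih 0 0 c d
          simp [flatOf] at h
          simp [fillRowA, consume, flatOf, List.replicate_succ, hx, h, Nat.succ_sub_succ]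
      · have h := ih 0 b c d
        simp [flatOf] at h
        simp [fillRowA, consume, flatOf, List.replicate_succ, hx, h, Nat.succ_sub_succ]
    · have h := ih a b c d
      simp [flatOf] at h
      simp [fillRowA, consume, flatOf, List.replicate_succ, hx, h, Nat.succ_sub_succ]

lemma flatOf_consume (n : Nat) (a b c d : Nat) :
    flatOf (consume n (a, b, c, d)).1 (consume n (a, b, c, d)).2.1
      (consume n (a, b, c, d)).2.2.1 (consume n (a, b, c, d)).2.2.2 =
      (flatOf a b c d).drop n := by
  induction n generalizing a b c d with
  | zero => simp [consume]
  | succ n ih =>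
    rcases a with _ | a
    · rcases b with _ | b
      · rcases c with _ | c
        · rcases d with _ | d
          · simp [consume, flatOf]
          · have h := ih 0 0 0 d
            simp [flatOf] at h
            simp [consume, flatOf, List.replicate_succ, h]
        · have h := ih 0 0 c d
          simp [flatOf] at h
          simp [consume, flatOf, List.replicate_succ, h]
      · have h := ih 0 b c d
        simp [flatOf] at h
        simp [consume, flatOf, List.replicate_succ, h]
    · have h := ih a b c d
      simp [flatOf] at h
      simp [consume, flatOf, List.replicate_succ, h]

lemma fillRowsA_eq (gs : List (List String)) (a b c d : Nat) :
    fillRowsA gs ((a : Int), (b : Int), (c : Int), (d : Int)) =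
      reshapeB gs (flatOf a b c d) := by
  induction gs generalizing a b c d with
  | nil => rfl
  | cons g gs ih =>
    simp only [fillRowsA, reshapeB, fillRowA_eq]
    refine congrArg₂ _ ?_ ?_
    · simp [List.length_take]
    · rcases h : consume g.length (a, b, c, d) with ⟨a', b', c', d'⟩
      have := flatOf_consume g.length a b c d
      rw [h] at this
      simpa [this] using ih a' b' c' d' 

-- ===== VERDICT =====
theorem separate_liquids_spec : Claim_equal_separate_liquids := by
  intro glass _
  unfold Spec_separate_liquids separate_liquids separate_liquids_alt
  rcases glass with _ | ⟨g, gs⟩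
  · rfl
  · rw [if_neg (by simp), countA_eq, fillRowsA_eq]
    rfl
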